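-- pv_equiv track=rewrite | github.com/andresca94/notarias | app/pipeline/act_engine.py | _format_cc
-- ===== SOURCE A (Python) =====
-- def _format_cc(digits: str) -> str:
--     """63501152 → 63.501.152  (puntos cada 3 desde la derecha)."""
--     if not digits or len(digits) < 6:
--         return digits
--     parts = []
--     d = digits
--     while d:
--         parts.append(d[-3:])
--         d = d[:-3]
--     return ".".join(reversed(parts))
-- ===== SOURCE B (Python) =====
-- def _format_cc(digits: str) -> str:
--     """63501152 → 63.501.152  (puntos cada 3 desde la derecha)."""
--     if not digits or len(digits) < 6:
--         return digits
--     first = len(digits) % 3 or 3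
--     groups = [digits[:first]]
--     for i in range(first, len(digits), 3):
--         groups.append(digits[i:i + 3])
--     return ".".join(groups)
-- ===== Notes on version B (the rewrite author's own statement) =====
-- stated objective: faster
-- what changed: Replaces A's right-to-left loop that repeatedly re-slices the whole remaining string (d[-3:]/d[:-3]) and then reverses the parts with a single left-to-right pass: compute the leading group size as len % 3 or 3, then emit fixed 3-char slices forward.
import Mathlib
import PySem

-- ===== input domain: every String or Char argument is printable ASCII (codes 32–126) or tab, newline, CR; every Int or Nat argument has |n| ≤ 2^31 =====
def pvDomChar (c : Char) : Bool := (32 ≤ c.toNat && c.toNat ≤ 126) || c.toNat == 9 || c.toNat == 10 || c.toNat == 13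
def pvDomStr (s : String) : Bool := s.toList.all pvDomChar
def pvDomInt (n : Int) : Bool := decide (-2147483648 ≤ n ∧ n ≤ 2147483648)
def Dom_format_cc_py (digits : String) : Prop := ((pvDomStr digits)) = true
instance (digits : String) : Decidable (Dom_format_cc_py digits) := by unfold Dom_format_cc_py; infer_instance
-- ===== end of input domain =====

-- B replaces A's right-to-left peel-and-reverse loop (repeated slicing of the whole remaining
-- string) by a single left-to-right pass driven by the computed size of the leading group.

-- ===== PORT A =====
-- while d: parts.append(d[-3:]); d = d[:-3]
def pvALoop (d : List Char) (parts : List (List Char)) : List (List Char) :=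
  if d = [] then parts
  else pvALoop (PySem.List.slice d none (some (-3)))
               (parts ++ [PySem.List.slice d (some (-3)) none])
termination_by d.length
decreasing_by
  rw [PySem.List.slice_to_neg_ofNat d 3 (by omega)]
  have : d.length ≠ 0 := by simpa [List.length_eq_zero_iff] using ‹¬ d = []›
  simp [List.length_take]; omega

def format_cc_py (digits : String) : String :=
  if digits.toList = [] ∨ digits.toList.length < 6 then digits
  else String.ofList (PySem.Chars.join ['.'] ((pvALoop digits.toList []).reverse))

-- ===== PORT B =====
def format_cc_py_alt (digits : String) : String :=
  if digits.toList = [] ∨ digits.toList.length < 6 then digits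
  else
    let cs := digits.toList
    let n : Int := cs.length
    -- first = len(digits) % 3 or 3
    let first : Int := if PySem.Int.mod n 3 = 0 then 3 else PySem.Int.mod n 3
    -- groups = [digits[:first]]; for i in range(first, len(digits), 3): groups.append(digits[i:i+3])
    let groups :=
      (PySem.List.pyRange first n 3).foldl
        (fun g i => g ++ [PySem.List.slice cs (some i) (some (i + 3))])
        [PySem.List.slice cs none (some first)]
    String.ofList (PySem.Chars.join ['.'] groups)

-- ===== PRECONDITION & SPEC =====
def Spec_format_cc_py (digits : String) (out : String) : Prop := out = format_cc_py_alt digits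
instance (digits : String) (out : String) : Decidable (Spec_format_cc_py digits out) := by unfold Spec_format_cc_py; infer_instance

-- ===== CLAIM (what is proved, stated in full; the proofs are below) =====
def Claim_equal_format_cc_py : Prop := ∀ (digits : String), Dom_format_cc_py digits → Spec_format_cc_py digits (format_cc_py digits)

-- ===== LEMMAS AND PROOFS =====

-- size of the leading group: len % 3, or 3 when that is 0
def pvF3 (n : Nat) : Nat := if n % 3 = 0 then 3 else n % 3

-- canonical left-to-right chunking with a computed first group
def pvFChunks (cs : List Char) : List (List Char) :=
  if cs = [] then []
  else cs.take (pvF3 cs.length) :: pvFChunks (cs.drop (pvF3 cs.length))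
termination_by cs.length
decreasing_by
  have : cs.length ≠ 0 := by simpa [List.length_eq_zero_iff] using ‹¬ cs = []›
  have h1 : 1 ≤ pvF3 cs.length := by unfold pvF3; split <;> omega
  simp [List.length_drop]; omega

-- plain chunking by 3 from the left
def pvTChunks (cs : List Char) : List (List Char) :=
  if cs = [] then []
  else cs.take 3 :: pvTChunks (cs.drop 3)
termination_by cs.length
decreasing_by
  have : cs.length ≠ 0 := by simpa [List.length_eq_zero_iff] using ‹¬ cs = []›
  simp [List.length_drop]; omega

lemma pvF3_pos (n : Nat) : 1 ≤ pvF3 n := by unfold pvF3; split <;> omega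

lemma pvFChunks_nil : pvFChunks [] = [] := by rw [pvFChunks]; simp

lemma pvFChunks_ne (cs : List Char) (h : cs ≠ []) :
    pvFChunks cs = cs.take (pvF3 cs.length) :: pvFChunks (cs.drop (pvF3 cs.length)) := by
  conv_lhs => rw [pvFChunks]
  rw [if_neg h]

lemma pvTChunks_nil : pvTChunks [] = [] := by rw [pvTChunks]; simp

lemma pvTChunks_ne (cs : List Char) (h : cs ≠ []) :
    pvTChunks cs = cs.take 3 :: pvTChunks (cs.drop 3) := by
  conv_lhs => rw [pvTChunks]
  rw [if_neg h]

lemma pvALoop_nil (parts : List (List Char)) : pvALoop [] parts = parts := by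
  rw [pvALoop]; simp

lemma pvALoop_ne (d : List Char) (parts : List (List Char)) (h : d ≠ []) :
    pvALoop d parts
      = pvALoop (d.take (d.length - 3)) (parts ++ [d.drop (d.length - 3)]) := by
  conv_lhs => rw [pvALoop]
  rw [if_neg h, PySem.List.slice_to_neg_ofNat d 3 (by omega),
      PySem.List.slice_from_neg_ofNat d 3 (by omega)]

lemma pvFChunks_eq_tchunks : ∀ (n : Nat) (cs : List Char), cs.length = n →
    cs.length % 3 = 0 → pvFChunks cs = pvTChunks cs := by
  intro n
  induction n using Nat.strong_induction_on with
  | _ n ih =>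
    intro cs hlen h
    by_cases hne : cs = []
    · subst hne; rw [pvFChunks_nil, pvTChunks_nil]
    · have hn0 : cs.length ≠ 0 := by simpa [List.length_eq_zero_iff] using hne
      have hf : pvF3 cs.length = 3 := by unfold pvF3; simp [h]
      rw [pvFChunks_ne cs hne, pvTChunks_ne cs hne, hf]
      congr 1
      exact ih (cs.length - 3) (by omega) _ (by simp only [List.length_drop])
        (by simp only [List.length_drop]; omega)

-- peeling the LAST ≤3 characters off, seen from the left-to-right chunking
lemma pvFChunks_peel : ∀ (n : Nat) (cs : List Char), cs.length = n → cs ≠ [] →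
    pvFChunks cs
      = pvFChunks (cs.take (cs.length - 3)) ++ [cs.drop (cs.length - 3)] := by
  intro n
  induction n using Nat.strong_induction_on with
  | _ n ih =>
    intro cs hlen hne
    have hn : 0 < cs.length := List.length_pos_iff.mpr hne
    by_cases hle : cs.length ≤ 3
    · have ht : cs.length - 3 = 0 := by omega
      have hff : pvF3 cs.length = cs.length ∨ pvF3 cs.length = 3 := by
        unfold pvF3; split <;> omega
      have htake : cs.take (pvF3 cs.length) = cs := by
        apply List.take_of_length_le; rcases hff with hf | hf <;> omega
      have hdrop : cs.drop (pvF3 cs.length) = [] := by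
        apply List.drop_eq_nil_of_le; rcases hff with hf | hf <;> omega
      rw [pvFChunks_ne cs hne, htake, hdrop, pvFChunks_nil, ht]
      simp [pvFChunks_nil]
    · set f := pvF3 cs.length with hfdef
      have hf1 : 1 ≤ f := pvF3_pos _
      have hf3 : f = pvF3 (cs.length - 3) := by
        rw [hfdef]; unfold pvF3; split <;> split <;> omega
      have hfle : f ≤ cs.length - 3 := by
        rw [hfdef]; unfold pvF3; split <;> omega
      have hdropne : cs.drop f ≠ [] := by
        simp only [← List.length_pos_iff, List.length_drop]; omega
      have htne : cs.take (cs.length - 3) ≠ [] := by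
        simp only [← List.length_pos_iff, List.length_take]; omega
      rw [pvFChunks_ne cs hne, pvFChunks_ne _ htne]
      have hlt : (cs.take (cs.length - 3)).length = cs.length - 3 := by
        simp [List.length_take]
      rw [hlt, ← hf3]
      have htt : (cs.take (cs.length - 3)).take f = cs.take f := by
        rw [List.take_take]; congr 1; omega
      have htd : (cs.take (cs.length - 3)).drop f
          = (cs.drop f).take (cs.length - 3 - f) := by
        rw [List.drop_take]
      rw [htt, htd]
      have hrec := ih (cs.length - f) (by omega) (cs.drop f)
        (by simp [List.length_drop]) hdropne
      have hlen' : (cs.drop f).length = cs.length - f := by simp [List.length_drop]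
      rw [hlen'] at hrec
      have harg : cs.length - f - 3 = cs.length - 3 - f := by omega
      rw [harg] at hrec
      have hdd : (cs.drop f).drop (cs.length - 3 - f) = cs.drop (cs.length - 3) := by
        rw [List.drop_drop]; congr 1; omega
      rw [hrec, hdd, List.cons_append]

-- A's loop accumulates the chunk list in reverse order
lemma pvALoop_eq : ∀ (n : Nat) (cs : List Char), cs.length = n →
    ∀ parts, pvALoop cs parts = parts ++ (pvFChunks cs).reverse := by
  intro n
  induction n using Nat.strong_induction_on with
  | _ n ih =>
    intro cs hlen parts
    by_cases hne : cs = []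
    · subst hne; rw [pvALoop_nil, pvFChunks_nil]; simp
    · have hn : 0 < cs.length := List.length_pos_iff.mpr hne
      rw [pvALoop_ne cs parts hne]
      rw [ih (cs.length - 3) (by omega) _ (by simp only [List.length_take]; omega) _]
      rw [pvFChunks_peel cs.length cs rfl hne]
      simp [List.append_assoc]

lemma pvRange3_nil (a b : Int) (h : b ≤ a) : PySem.List.pyRange a b 3 = [] := by
  rw [PySem.List.pyRange_of_pos a b (by omega)]
  rw [if_neg (by omega)]
  simp

lemma pvRange3_cons (a b : Int) (h : a < b) :
    PySem.List.pyRange a b 3 = a :: PySem.List.pyRange (a + 3) b 3 := by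
  rw [PySem.List.pyRange_of_pos a b (by omega),
      PySem.List.pyRange_of_pos (a + 3) b (by omega)]
  rw [if_pos h]
  by_cases h3 : a + 3 < b
  · rw [if_pos h3]
    have hN : ((b - a + 3 - 1) / 3).toNat = ((b - (a + 3) + 3 - 1) / 3).toNat + 1 := by
      omega
    rw [hN, List.range_succ_eq_map]
    simp only [List.map_cons, List.map_map]
    congr 1
    · simp
    · apply List.map_congr_left
      intro k _
      simp [Function.comp, Nat.succ_eq_add_one]
      ring
  · rw [if_neg h3]
    have hN : ((b - a + 3 - 1) / 3).toNat = 1 := by omega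
    rw [hN]
    simp [List.range_one]

-- B's range-fold is plain chunking by 3 from index i on
lemma pvFold_chunks (cs : List Char) : ∀ (m i : Nat), cs.length - i = m →
    ∀ acc, (PySem.List.pyRange (i : Int) (cs.length : Int) 3).foldl
        (fun g j => g ++ [PySem.List.slice cs (some j) (some (j + 3))]) acc
      = acc ++ pvTChunks (cs.drop i) := by
  intro m
  induction m using Nat.strong_induction_on with
  | _ m ih =>
    intro i hm acc
    by_cases hib : (i : Int) < (cs.length : Int)
    · have hi : i < cs.length := by exact_mod_cast hib
      rw [pvRange3_cons _ _ hib]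
      simp only [List.foldl_cons]
      rw [show ((i : Int) + 3) = ((i + 3 : Nat) : Int) by push_cast; ring]
      rw [ih (cs.length - (i + 3)) (by omega) (i + 3) rfl _]
      have hdne : cs.drop i ≠ [] := by
        simp only [← List.length_pos_iff, List.length_drop]; omega
      rw [pvTChunks_ne _ hdne]
      have hslice : PySem.List.slice cs (some (i : Int)) (some ((i + 3 : Nat) : Int))
          = (cs.drop i).take 3 := by
        rw [PySem.List.slice_toNat cs (by omega) (by omega)]
        have h1 : ((i + 3 : Nat) : Int).toNat = i + 3 := by omega
        have h2 : ((i : Nat) : Int).toNat = i := by omega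
        rw [h1, h2]
        congr 1
        omega
      rw [hslice]
      have hdd : (cs.drop i).drop 3 = cs.drop (i + 3) := by
        rw [List.drop_drop]
      rw [hdd]
      simp [List.append_assoc]
    · have hle : cs.length ≤ i := by exact_mod_cast not_lt.mp hib
      rw [pvRange3_nil _ _ (not_lt.mp hib)]
      rw [List.drop_eq_nil_of_le hle, pvTChunks_nil]
      simp

-- Python's `n % 3` for a nonnegative n is fmod = emod
lemma pvMod3 (n : Nat) : PySem.Int.mod (n : Int) 3 = ((n % 3 : Nat) : Int) := by
  unfold PySem.Int.mod
  rw [Int.fmod_eq_emod, if_pos (Or.inl (by norm_num)), add_zero]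
  push_cast
  ring

-- ===== VERDICT (by name: the statement is the Claim_ definition above) =====
theorem format_cc_py_spec : Claim_equal_format_cc_py := by
  intro digits _
  unfold Spec_format_cc_py format_cc_py format_cc_py_alt
  by_cases hg : digits.toList = [] ∨ digits.toList.length < 6
  · rw [if_pos hg, if_pos hg]
  · rw [if_neg hg, if_neg hg]
    push_neg at hg
    obtain ⟨hne, h6⟩ := hg
    set cs := digits.toList with hcs
    dsimp only
    have hn : 0 < cs.length := by omega
    -- identify `first` with pvF3
    have hfirst : (if PySem.Int.mod (cs.length : Int) 3 = 0 then 3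
        else PySem.Int.mod (cs.length : Int) 3) = ((pvF3 cs.length : Nat) : Int) := by
      rw [pvMod3]
      unfold pvF3
      by_cases h : cs.length % 3 = 0
      · rw [if_pos (by exact_mod_cast congrArg (Nat.cast : Nat → Int) h), if_pos h]
        all_goals norm_num
      · rw [if_neg (by exact_mod_cast fun hc => h (by exact_mod_cast hc)), if_neg h]
    rw [hfirst]
    have hsl : PySem.List.slice cs none (some ((pvF3 cs.length : Nat) : Int))
        = cs.take (pvF3 cs.length) := by
      rw [PySem.List.slice_to cs (by omega)]
      simp
    rw [hsl]
    rw [pvFold_chunks cs (cs.length - pvF3 cs.length) (pvF3 cs.length) rfl _]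
    rw [pvALoop_eq cs.length cs rfl []]
    rw [List.nil_append, List.reverse_reverse]
    rw [pvFChunks_ne cs (by simpa [← List.length_pos_iff] using hn)]
    rw [List.singleton_append]
    have hFT : pvFChunks (cs.drop (pvF3 cs.length)) = pvTChunks (cs.drop (pvF3 cs.length)) := by
      apply pvFChunks_eq_tchunks ((cs.drop (pvF3 cs.length)).length) _ rfl
      have := pvF3_pos cs.length
      simp only [List.length_drop]
      unfold pvF3
      split <;> omega
    rw [hFT]
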